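-- pv_equiv track=rewrite | github.com/GorkemParadise/algorithms | PY_temp/Competitive/2025/METU'25 AlgoLeague/MasterCook.py | possible_wins
-- ===== SOURCE A (Python) =====
-- def possible_wins(M, B):
--     M_sorted = sorted(M)
--     B_sorted = sorted(B)
--     i = j = wins = 0
--     n = len(M_sorted)
--     while i < n and j < n:
--         if B_sorted[j] > M_sorted[i]:
--             wins += 1
--             i += 1
--             j += 1
--         else:
--             j += 1
--     return wins
-- ===== SOURCE B (Python) =====
-- def possible_wins(M, B):
--     # Event-sweep: encode each meal as m*2+1 and each of the len(M) smallest
--     # banquets as b*2, sort the single encoded list descending, then sweep it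
--     # once keeping a counter of banquets still available; a banquet strictly
--     # beats a meal exactly when its even code precedes the meal's odd code.
--     n = len(M)
--     events = [m * 2 + 1 for m in M] + [b * 2 for b in sorted(B)[:n]]
--     events.sort(reverse=True)
--     wins = avail = 0
--     for e in events:
--         if e % 2 == 0:
--             avail += 1
--         elif avail > 0:
--             wins += 1
--             avail -= 1
--     return wins
-- ===== Notes on version B (the rewrite author's own statement) =====
-- stated objective: alternative
-- what changed: A matches the two sorted arrays against each other with an ascending two-pointer scan; B never compares a banquet with a meal directly: it encodes meals as m*2+1 and the len(M) smallest banquets as b*2 into ONE list, sorts it descending, and sweeps it once with an availability counter (banquet event: counter+1; meal event: win if counter>0), so there is no pairwise pointer matching at all.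
import Mathlib
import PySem

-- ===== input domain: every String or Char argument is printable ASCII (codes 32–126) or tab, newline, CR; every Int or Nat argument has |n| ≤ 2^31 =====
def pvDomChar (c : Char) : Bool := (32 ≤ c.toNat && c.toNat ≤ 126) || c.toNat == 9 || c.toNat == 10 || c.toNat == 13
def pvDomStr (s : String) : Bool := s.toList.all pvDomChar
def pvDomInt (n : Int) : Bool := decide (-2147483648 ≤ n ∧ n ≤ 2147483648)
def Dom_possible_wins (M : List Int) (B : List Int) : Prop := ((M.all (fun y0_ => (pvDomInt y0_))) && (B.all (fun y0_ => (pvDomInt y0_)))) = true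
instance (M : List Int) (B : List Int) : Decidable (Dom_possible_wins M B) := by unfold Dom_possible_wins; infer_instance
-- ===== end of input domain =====

-- B replaces A's two-pointer matching of the two sorted arrays by a single-list event sweep:
-- meals and the len(M) smallest banquets are encoded into one integer list (m*2+1 / b*2),
-- sorted once descending, and swept with an availability counter (objective: alternative).

-- ===== PORT A =====
-- A's while loop; i, j, wins, n as in the Python. B_sorted[j]/M_sorted[i] are ported with
-- List.getD (indices are always ≥ 0 here); under Pre_ both reads are in range, as in Python.
def pwLoopA (Ms Bs : List Int) (n i j : Nat) (wins : Int) : Int :=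
  if h : i < n ∧ j < n then
    if Ms.getD i 0 < Bs.getD j 0 then
      pwLoopA Ms Bs n (i + 1) (j + 1) (wins + 1)
    else
      pwLoopA Ms Bs n i (j + 1) wins
  else wins
termination_by n - j
decreasing_by all_goals omega

def possible_wins (M : List Int) (B : List Int) : Int :=
  let M_sorted := PySem.List.sorted M (fun x => x) false
  let B_sorted := PySem.List.sorted B (fun x => x) false
  pwLoopA M_sorted B_sorted M_sorted.length 0 0 0

-- ===== PORT B =====
-- Source B: events = [m*2+1 for m in M] + [b*2 for b in sorted(B)[:n]]; events.sort(reverse=True);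
-- then one fold with state (wins, avail).
def possible_wins_alt (M : List Int) (B : List Int) : Int :=
  let n := M.length
  let events := (M.map (fun m => m * 2 + 1)) ++
    ((PySem.List.slice (PySem.List.sorted B (fun x => x) false) none (some (n : Int))).map
      (fun b => b * 2))
  let evs := PySem.List.sorted events (fun x => x) true
  (evs.foldl
    (fun (st : Int × Int) e =>
      if PySem.Int.mod e 2 = 0 then (st.1, st.2 + 1)
      else if 0 < st.2 then (st.1 + 1, st.2 - 1) else st)
    (0, 0)).1

-- ===== PRECONDITION & SPEC =====
-- A raises IndexError exactly when len(B) < len(M) (and then M ≠ []); those inputs are excluded.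
def Pre_possible_wins (M : List Int) (B : List Int) : Prop := M.length ≤ B.length
instance (M : List Int) (B : List Int) : Decidable (Pre_possible_wins M B) := by unfold Pre_possible_wins; infer_instance
def pvWitness_possible_wins : List Int × List Int := ([3, 1, 2], [2, 2, 5])

def Spec_possible_wins (M : List Int) (B : List Int) (out : Int) : Prop := out = possible_wins_alt M B
instance (M : List Int) (B : List Int) (out : Int) : Decidable (Spec_possible_wins M B out) := by unfold Spec_possible_wins; infer_instance

-- ===== CLAIM (what is proved, stated in full; the proofs are below) =====
def Claim_equal_possible_wins : Prop := ∀ (M : List Int) (B : List Int), Dom_possible_wins M B → Pre_possible_wins M B → Spec_possible_wins M B (possible_wins M B)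
-- ===== LEMMAS AND PROOFS =====

-- A's scan, structurally: ascending greedy over the two sorted lists.
def AA : List Int → List Int → Int
  | _, [] => 0
  | [], _ :: _ => 0
  | m :: ms, b :: bs => if m < b then 1 + AA ms bs else AA (m :: ms) bs
termination_by ms bs => ms.length + bs.length
decreasing_by all_goals simp <;> omega

-- the same greedy over the two lists sorted DESCENDING.
def DD : List Int → List Int → Int
  | [], _ => 0
  | _ :: _, [] => 0
  | m :: ms, b :: bs => if m < b then 1 + DD ms bs else DD ms (b :: bs)

-- B's sweep, structurally: descending event merge with an availability counter.
def SW : List Int → List Int → Int → Int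
  | [], _, _ => 0
  | m :: ms, [], c => if 0 < c then 1 + SW ms [] (c - 1) else SW ms [] c
  | m :: ms, b :: bs, c =>
      if m < b then SW (m :: ms) bs (c + 1)
      else if 0 < c then 1 + SW ms (b :: bs) (c - 1) else SW ms (b :: bs) c
termination_by ms bs _ => ms.length + bs.length
decreasing_by all_goals simp

-- the merged descending event list (meals m*2+1, banquets b*2).
def EV : List Int → List Int → List Int
  | ms, [] => ms.map (fun m => m * 2 + 1)
  | [], b :: bs => (b :: bs).map (fun b => b * 2)
  | m :: ms, b :: bs =>
      if m < b then (b * 2) :: EV (m :: ms) bs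
      else (m * 2 + 1) :: EV ms (b :: bs)
termination_by ms bs => ms.length + bs.length
decreasing_by all_goals simp

theorem AA_nil_left (bs : List Int) : AA [] bs = 0 := by
  cases bs <;> simp [AA]

theorem AA_nil_right (ms : List Int) : AA ms [] = 0 := by
  cases ms <;> simp [AA]

theorem DD_nil_right (ms : List Int) : DD ms [] = 0 := by
  cases ms <;> simp [DD]

theorem AA_singleton (m : Int) (bs : List Int) :
    AA [m] bs = if bs.any (fun b => m < b) then 1 else 0 := by
  induction bs with
  | nil => simp [AA]
  | cons b bs ih =>
    by_cases h : m < b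
    · simp [AA, h, AA_nil_left]
    · simp [AA, h, ih]

theorem AA_append_win (ms bs : List Int) (m b : Int)
    (hm : ∀ x ∈ ms, x ≤ m) (hb : ∀ y ∈ bs, y ≤ b) (hmb : m < b) :
    AA (ms ++ [m]) (bs ++ [b]) = 1 + AA ms bs := by
  induction bs generalizing ms with
  | nil =>
    cases ms with
    | nil => simp [AA, hmb]
    | cons x ms' =>
      have hx : x < b := lt_of_le_of_lt (hm x (by simp)) hmb
      simp [AA, hx, AA_nil_right]
  | cons y bs' ih =>
    cases ms with
    | nil =>
      simp only [List.nil_append]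
      rw [AA_nil_left, AA_singleton, if_pos (by simp [hmb])]
      norm_num
    | cons x ms' =>
      by_cases hxy : x < y
      · have h1 := ih ms' (fun z hz => hm z (by simp [hz])) (fun z hz => hb z (by simp [hz]))
        simp [AA, hxy, h1]
      · have h2 := ih (x :: ms') hm (fun z hz => hb z (by simp [hz]))
        simp [AA, hxy] at h2 ⊢
        exact h2

theorem AA_append_skip (ms bs : List Int) (m : Int)
    (hb : ∀ y ∈ bs, y ≤ m) :
    AA (ms ++ [m]) bs = AA ms bs := by
  induction bs generalizing ms with
  | nil => rw [AA_nil_right, AA_nil_right]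
  | cons y bs' ih =>
    cases ms with
    | nil =>
      simp only [List.nil_append]
      have hany : ¬ (((y :: bs').any (fun z => m < z)) = true) := by
        simp only [List.any_eq_true, not_exists]
        intro z hz
        exact absurd (of_decide_eq_true hz.2) (not_lt.mpr (hb z hz.1))
      rw [AA_nil_left, AA_singleton, if_neg hany]
    | cons x ms' =>
      by_cases hxy : x < y
      · have h1 := ih ms' (fun z hz => hb z (by simp [hz]))
        simp [AA, hxy, h1]
      · have h2 := ih (x :: ms') (fun z hz => hb z (by simp [hz]))
        simp [AA, hxy] at h2 ⊢
        exact h2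

theorem AA_cons (m b : Int) (ms bs : List Int) :
    AA (m :: ms) (b :: bs) = if m < b then 1 + AA ms bs else AA (m :: ms) bs := by
  rw [AA]

-- Ascending greedy on the sorted lists = descending greedy on the reversed (descending) lists.
theorem AA_eq_DD (msd bsd : List Int)
    (hms : msd.Pairwise (fun a b => b ≤ a)) (hbs : bsd.Pairwise (fun a b => b ≤ a))
    (hlen : msd.length ≤ bsd.length) :
    AA msd.reverse bsd.reverse = DD msd bsd := by
  induction msd generalizing bsd with
  | nil => simp [AA_nil_left, DD]
  | cons m msd' ih =>
    cases bsd with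
    | nil => simp at hlen
    | cons b bsd' =>
      rw [List.pairwise_cons] at hms hbs
      obtain ⟨hm, hms'⟩ := hms
      obtain ⟨hbh, hbs'⟩ := hbs
      simp only [List.reverse_cons]
      by_cases hmb : m < b
      · rw [AA_append_win msd'.reverse bsd'.reverse m b
          (fun x hx => hm x (List.mem_reverse.mp hx))
          (fun y hy => hbh y (List.mem_reverse.mp hy)) hmb]
        rw [ih bsd' hms' hbs' (by simpa using hlen)]
        simp [DD, hmb]
      · rw [AA_append_skip msd'.reverse (bsd'.reverse ++ [b]) m]
        · rw [show bsd'.reverse ++ [b] = (b :: bsd').reverse by simp]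
          rw [ih (b :: bsd') hms' (List.pairwise_cons.mpr ⟨hbh, hbs'⟩)
            (by simp at hlen ⊢; omega)]
          simp [DD, hmb]
        · intro y hy
          rcases List.mem_append.mp hy with h | h
          · exact le_trans (hbh y (List.mem_reverse.mp h)) (not_lt.mp hmb)
          · simp at h; subst h; exact not_lt.mp hmb

-- A's index loop computes the ascending greedy over the suffixes.
theorem pwLoopA_eq_AA (Ms Bs : List Int) (hn : Ms.length ≤ Bs.length)
    (i j : Nat) (wins : Int) :
    pwLoopA Ms Bs Ms.length i j wins = wins + AA (Ms.drop i) ((Bs.take Ms.length).drop j) := by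
  rw [pwLoopA]
  by_cases h : i < Ms.length ∧ j < Ms.length
  · obtain ⟨hi, hj⟩ := h
    have hjB : j < (Bs.take Ms.length).length := by simp; omega
    have hMs : Ms.drop i = Ms[i] :: Ms.drop (i + 1) := List.drop_eq_getElem_cons hi
    have hBs : (Bs.take Ms.length).drop j =
        (Bs.take Ms.length)[j] :: (Bs.take Ms.length).drop (j + 1) :=
      List.drop_eq_getElem_cons hjB
    have hgB : Bs.getD j 0 = (Bs.take Ms.length)[j] := by
      rw [List.getElem_take, List.getD_eq_getElem Bs 0 (by omega)]
    have hgM : Ms.getD i 0 = Ms[i] := List.getD_eq_getElem Ms 0 hi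
    rw [dif_pos ⟨hi, hj⟩, hgB, hgM]
    by_cases hc : Ms[i] < (Bs.take Ms.length)[j]
    · rw [if_pos hc, pwLoopA_eq_AA Ms Bs hn (i + 1) (j + 1) (wins + 1)]
      rw [hMs, hBs, AA_cons, if_pos hc]
      ring
    · rw [if_neg hc, pwLoopA_eq_AA Ms Bs hn i (j + 1) wins]
      rw [hMs, hBs, AA_cons, if_neg hc, ← hMs]
  · rw [dif_neg h]
    rcases not_and_or.mp h with h' | h'
    · rw [List.drop_eq_nil_of_le (by omega), AA_nil_left]; ring
    · have hle : (Bs.take Ms.length).length ≤ j := by rw [List.length_take]; omega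
      rw [List.drop_eq_nil_of_le hle, AA_nil_right]; ring
termination_by Ms.length - j
decreasing_by all_goals omega

theorem EV_perm (ms bs : List Int) :
    (EV ms bs).Perm (ms.map (fun m => m * 2 + 1) ++ bs.map (fun b => b * 2)) := by
  induction ms, bs using EV.induct with
  | case1 ms => simp [EV]
  | case2 b bs => simp [EV]
  | case3 m ms b bs h ih =>
    rw [EV, if_pos h]
    exact ((ih.cons (b*2)).trans (List.perm_middle.symm))
  | case4 m ms b bs h ih =>
    rw [EV, if_neg h]
    simpa using ih.cons (m*2+1)

theorem mem_EV {ms bs : List Int} {x : Int} (hx : x ∈ EV ms bs) :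
    (∃ m ∈ ms, x = m * 2 + 1) ∨ (∃ b ∈ bs, x = b * 2) := by
  have h := (EV_perm ms bs).mem_iff.mp hx
  simp only [List.mem_append, List.mem_map] at h
  rcases h with ⟨m, hm, rfl⟩ | ⟨b, hb, rfl⟩
  · exact Or.inl ⟨m, hm, rfl⟩
  · exact Or.inr ⟨b, hb, rfl⟩

theorem EV_pairwise (ms bs : List Int)
    (hms : ms.Pairwise (fun a b => b ≤ a)) (hbs : bs.Pairwise (fun a b => b ≤ a)) :
    (EV ms bs).Pairwise (fun a b => b ≤ a) := by
  induction ms, bs using EV.induct with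
  | case1 ms =>
    rw [EV]
    exact (List.pairwise_map).mpr (hms.imp (by intro a b h; omega))
  | case2 b bs =>
    rw [EV]
    exact (List.pairwise_map).mpr (hbs.imp (by intro a b h; omega))
  | case3 m ms b bs h ih =>
    rw [EV, if_pos h]
    rw [List.pairwise_cons] at hbs
    refine List.pairwise_cons.mpr ⟨?_, ih hms hbs.2⟩
    intro y hy
    rcases mem_EV hy with ⟨x, hx, rfl⟩ | ⟨b', hb', rfl⟩
    · have hxm : x ≤ m := by
        rcases List.mem_cons.mp hx with rfl | hx'
        · exact le_refl x
        · exact (List.pairwise_cons.mp hms).1 x hx'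
      omega
    · have := hbs.1 b' hb'
      omega
  | case4 m ms b bs h ih =>
    rw [EV, if_neg h]
    rw [List.pairwise_cons] at hms
    refine List.pairwise_cons.mpr ⟨?_, ih hms.2 hbs⟩
    intro y hy
    rcases mem_EV hy with ⟨x, hx, rfl⟩ | ⟨b', hb', rfl⟩
    · have := hms.1 x hx
      omega
    · have hb'b : b' ≤ b := by
        rcases List.mem_cons.mp hb' with rfl | hb''
        · exact le_refl b'
        · exact (List.pairwise_cons.mp hbs).1 b' hb''
      omega

theorem mod_two_odd (m : Int) : PySem.Int.mod (m * 2 + 1) 2 = 1 := by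
  rw [PySem.Int.mod_eq_emod_of_pos (by norm_num : (0:Int) < 2)]
  omega

theorem mod_two_even (b : Int) : PySem.Int.mod (b * 2) 2 = 0 := by
  rw [PySem.Int.mod_eq_emod_of_pos (by norm_num : (0:Int) < 2)]
  omega

theorem fold_meals (ms : List Int) (w c : Int) :
    ((ms.map (fun m => m * 2 + 1)).foldl
      (fun (st : Int × Int) e =>
        if PySem.Int.mod e 2 = 0 then (st.1, st.2 + 1)
        else if 0 < st.2 then (st.1 + 1, st.2 - 1) else st)
      (w, c)).1 = w + SW ms [] c := by
  induction ms generalizing w c with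
  | nil => simp [SW]
  | cons m ms ih =>
    simp only [List.map_cons, List.foldl_cons, mod_two_odd]
    rw [SW]
    by_cases hc : 0 < c
    · rw [if_neg (by omega), if_pos hc, if_pos hc, ih]
      ring
    · rw [if_neg (by omega), if_neg hc, if_neg hc, ih]

theorem fold_banquets (bs : List Int) (w c : Int) :
    ((bs.map (fun b => b * 2)).foldl
      (fun (st : Int × Int) e =>
        if PySem.Int.mod e 2 = 0 then (st.1, st.2 + 1)
        else if 0 < st.2 then (st.1 + 1, st.2 - 1) else st)
      (w, c)).1 = w := by
  induction bs generalizing c with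
  | nil => simp
  | cons b bs ih =>
    simp only [List.map_cons, List.foldl_cons, mod_two_even, if_pos]
    exact ih (c + 1)

theorem fold_EV (ms bs : List Int) (w c : Int) :
    ((EV ms bs).foldl
      (fun (st : Int × Int) e =>
        if PySem.Int.mod e 2 = 0 then (st.1, st.2 + 1)
        else if 0 < st.2 then (st.1 + 1, st.2 - 1) else st)
      (w, c)).1 = w + SW ms bs c := by
  induction ms, bs using EV.induct generalizing w c with
  | case1 ms => rw [EV]; exact fold_meals ms w c
  | case2 b bs => rw [EV, show SW [] (b :: bs) c = 0 by rw [SW]]; simpa using fold_banquets (b :: bs) w c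
  | case3 m ms b bs h ih =>
    rw [EV, if_pos h, SW, if_pos h]
    simp only [List.foldl_cons, mod_two_even, if_pos]
    exact ih w (c + 1)
  | case4 m ms b bs h ih =>
    rw [EV, if_neg h, SW, if_neg h]
    simp only [List.foldl_cons, mod_two_odd]
    by_cases hc : 0 < c
    · rw [if_neg (by omega), if_pos hc, if_pos hc, ih]
      ring
    · rw [if_neg (by omega), if_neg hc, if_neg hc, ih]

theorem SW_eq_aux : ∀ (N : Nat) (ms bs : List Int) (k : Nat),
    ms.length + bs.length ≤ N → ms.Pairwise (fun a b => b ≤ a) →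
    SW ms bs (k : Int) =
      (if ms.length ≤ k then (ms.length : Int) else (k : Int) + DD (ms.drop k) bs) := by
  intro N
  induction N with
  | zero =>
    intro ms bs k hN hms
    cases ms with
    | nil => simp [SW]
    | cons m ms' => simp at hN
  | succ N ih =>
    intro ms bs k hN hms
    cases ms with
    | nil => simp [SW]
    | cons m ms' =>
      have hm : ∀ y ∈ ms', y ≤ m := (List.pairwise_cons.mp hms).1
      have hms' : ms'.Pairwise (fun a b => b ≤ a) := (List.pairwise_cons.mp hms).2
      cases bs with
      | nil =>
        rw [SW]
        rcases Nat.eq_zero_or_pos k with rfl | hk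
        · rw [if_neg (by omega)]
          rw [ih ms' [] 0 (by simp at hN ⊢; omega) hms']
          simp only [DD_nil_right, List.length_cons, List.drop_zero]
          split_ifs <;> push_cast <;> omega
        · rw [if_pos (by omega), show ((k : Int) - 1) = ((k - 1 : Nat) : Int) by omega,
            ih ms' [] (k - 1) (by simp at hN ⊢; omega) hms']
          simp only [DD_nil_right, List.length_cons]
          split_ifs <;> push_cast <;> omega
      | cons b bs' =>
        rw [SW]
        by_cases hmb : m < b
        · rw [if_pos hmb, show ((k : Int) + 1) = ((k + 1 : Nat) : Int) by omega,
            ih (m :: ms') bs' (k + 1) (by simp at hN ⊢; omega) hms]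
          by_cases hk : (m :: ms').length ≤ k
          · rw [if_pos (by omega), if_pos hk]
          · -- k < length: the head of drop k is ≤ m < b, so DD matches it with b
            have hklt : k < (m :: ms').length := by omega
            have hdrop : (m :: ms').drop k = (m :: ms')[k] :: (m :: ms').drop (k + 1) :=
              List.drop_eq_getElem_cons hklt
            have hxle : (m :: ms')[k] ≤ m := by
              have hmem : (m :: ms')[k] ∈ m :: ms' := List.getElem_mem hklt
              rcases List.mem_cons.mp hmem with he | hx'
              · omega
              · exact hm _ hx'
            have hxb : (m :: ms')[k] < b := lt_of_le_of_lt hxle hmb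
            rw [if_neg hk, hdrop, DD, if_pos hxb]
            by_cases hk1 : (m :: ms').length ≤ k + 1
            · have hnil : (m :: ms').drop (k + 1) = [] := List.drop_eq_nil_of_le (by omega)
              rw [if_pos hk1, hnil]
              simp only [List.length_cons] at *
              simp [DD]
              omega
            · rw [if_neg hk1]
              push_cast
              ring
        · rcases Nat.eq_zero_or_pos k with rfl | hk
          · rw [if_neg hmb, if_neg (by omega), ih ms' (b :: bs') 0 (by simp at hN ⊢; omega) hms']
            simp only [List.length_cons, List.drop_zero, Nat.cast_zero]
            rw [DD, if_neg hmb]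
            by_cases h0 : ms'.length ≤ 0
            · have hnil : ms' = [] := List.eq_nil_of_length_eq_zero (by omega)
              subst hnil
              simp [DD]
            · rw [if_neg h0, if_neg (by omega)]
          · obtain ⟨k', rfl⟩ : ∃ k', k = k' + 1 := ⟨k - 1, by omega⟩
            rw [if_neg hmb, if_pos (by push_cast; omega),
              show ((k' + 1 : Nat) : Int) - 1 = ((k' : Nat) : Int) by push_cast; ring,
              ih ms' (b :: bs') k' (by simp at hN ⊢; omega) hms']
            simp only [List.length_cons, List.drop_succ_cons]
            generalize DD (ms'.drop k') (b :: bs') = d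
            split_ifs <;> push_cast <;> omega

theorem SW_eq (ms bs : List Int) (k : Nat)
    (hms : ms.Pairwise (fun a b => b ≤ a)) :
    SW ms bs (k : Int) =
      if ms.length ≤ k then (ms.length : Int) else (k : Int) + DD (ms.drop k) bs :=
  SW_eq_aux (ms.length + bs.length) ms bs k (le_refl _) hms

theorem SW_eq_DD (ms bs : List Int) (hms : ms.Pairwise (fun a b => b ≤ a)) :
    SW ms bs 0 = DD ms bs := by
  have h := SW_eq ms bs 0 hms
  rw [Nat.cast_zero] at h
  rw [h]
  rcases ms with _ | ⟨m, ms'⟩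
  · simp [DD]
  · simp

-- ===== VERDICT (by name: the statement is the Claim_ definition above) =====
theorem possible_wins_spec : Claim_equal_possible_wins := by
  intro M B _ hpre
  have hpre' : M.length ≤ B.length := hpre
  unfold Spec_possible_wins possible_wins possible_wins_alt
  set Ms := PySem.List.sorted M (fun x => x) false with hMsdef
  set Bfull := PySem.List.sorted B (fun x => x) false with hBdef
  have hlenM : Ms.length = M.length := PySem.List.length_sorted ..
  have hlenB : Bfull.length = B.length := PySem.List.length_sorted ..
  have hslice : PySem.List.slice Bfull none (some ((M.length : Nat) : Int)) =
      Bfull.take M.length := PySem.List.slice_to_natCast ..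
  simp only [hslice]
  set msd := Ms.reverse with hmsddef
  set bsd := (Bfull.take M.length).reverse with hbsddef
  have hMs_pair : Ms.Pairwise (fun a b => a ≤ b) := PySem.List.sorted_pairwise ..
  have hB_pair : Bfull.Pairwise (fun a b => a ≤ b) := PySem.List.sorted_pairwise ..
  have hmsd : msd.Pairwise (fun a b => b ≤ a) := List.pairwise_reverse.mpr hMs_pair
  have hbsd : bsd.Pairwise (fun a b => b ≤ a) :=
    List.pairwise_reverse.mpr (hB_pair.sublist (List.take_sublist _ _))
  -- A's loop = ascending greedy = descending greedy
  have hA := pwLoopA_eq_AA Ms Bfull (by omega) 0 0 0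
  simp only [List.drop_zero, zero_add] at hA
  have hAA : AA Ms (Bfull.take Ms.length) = DD msd bsd := by
    have h := AA_eq_DD msd bsd hmsd hbsd
      (by simp [hmsddef, hbsddef]; omega)
    simpa [hmsddef, hbsddef, hlenM] using h
  -- B's sorted event list is the merged descending event list
  have hperm : (EV msd bsd).Perm
      (M.map (fun m => m * 2 + 1) ++ (Bfull.take M.length).map (fun b => b * 2)) :=
    (EV_perm msd bsd).trans
      (List.Perm.append
        (((Ms.reverse_perm).trans (PySem.List.sorted_perm ..)).map _)
        ((List.reverse_perm _).map _))
  have hevs : PySem.List.sorted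
      (M.map (fun m => m * 2 + 1) ++ (Bfull.take M.length).map (fun b => b * 2))
      (fun x => x) true = EV msd bsd :=
    List.Perm.eq_of_pairwise (fun a b _ _ hab hba => le_antisymm hba hab)
      (PySem.List.sorted_pairwise_rev ..) (EV_pairwise msd bsd hmsd hbsd)
      ((PySem.List.sorted_perm ..).trans hperm.symm)
  rw [hA, hAA, hevs, fold_EV msd bsd 0 0, zero_add, SW_eq_DD msd bsd hmsd]
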